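-- pv_equiv track=rewrite | github.com/Doggzone/pppython | solution/chap6sol/chap6sol.py | longest_streak2
-- ===== SOURCE A (Python) =====
-- def longest_streak2(s):
--     if s != '':
--         contender = leader = s[0]
--         streak_length = streak_record = 1
--         contender_index = leader_index = 0
--         ties = []
--         index = 1
--         for n in s[1:]:
--             if n == contender:
--                 streak_length += 1
--             else:
--                 contender = n
--                 streak_length = 1
--                 contender_index = index
--             if streak_length > streak_record:
--                 leader = contender
--                 streak_record = streak_length
--                 leader_index = contender_index
--                 ties = []
--             elif streak_length == streak_record:
--                 coleader = (contender, streak_length, contender_index)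
--                 ties.append(coleader)
--             index += 1
--         return [(leader, streak_record, leader_index)] + ties
--     else:
--         return []
-- ===== SOURCE B (Python) =====
-- def longest_streak2(s):
--     if s == '':
--         return []
--     runs = []
--     prev = s[0]
--     length = 1
--     start = 0
--     for i in range(1, len(s)):
--         c = s[i]
--         if c == prev:
--             length += 1
--         else:
--             runs.append((prev, length, start))
--             prev, length, start = c, 1, i
--     runs.append((prev, length, start))
--     best = max(r[1] for r in runs)
--     return [r for r in runs if r[1] == best]
-- ===== Notes on version B (the rewrite author's own statement) =====
-- stated objective: simpler
-- what changed: Instead of A's eight-variable single pass that maintains leader/record/ties with reset logic, B first builds the explicit list of (char, run_length, start) runs, then takes the max run length and filters the runs equal to it, preserving order.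
import Mathlib
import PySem

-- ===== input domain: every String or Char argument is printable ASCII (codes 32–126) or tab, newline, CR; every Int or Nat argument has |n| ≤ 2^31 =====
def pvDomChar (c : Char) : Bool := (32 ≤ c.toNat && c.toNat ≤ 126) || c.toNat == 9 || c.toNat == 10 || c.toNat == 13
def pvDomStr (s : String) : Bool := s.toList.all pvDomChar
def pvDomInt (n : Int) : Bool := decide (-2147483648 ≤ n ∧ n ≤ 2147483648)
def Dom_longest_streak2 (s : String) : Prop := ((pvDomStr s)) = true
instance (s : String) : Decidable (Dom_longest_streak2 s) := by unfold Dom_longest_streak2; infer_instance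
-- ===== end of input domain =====

-- B replaces A's eight-variable leader/record/ties state machine by an explicit runs list
-- followed by max-and-filter: simpler decomposition, same O(n) cost.

-- ===== PORT A =====
-- the for-loop over s[1:] with its mutable state, step for step
def pvLoopA : List Char → Char → Char → Int → Int → Int → Int →
    List (String × Int × Int) → Int → List (String × Int × Int)
  | [], _cont, leader, _sl, sr, _ci, li, ties, _idx =>
      (leader.toString, sr, li) :: ties
  | n :: rest, cont, leader, sl, sr, ci, li, ties, idx =>
      -- first if/else: extend the streak or start a new contender
      let st := if n == cont then (cont, sl + 1, ci) else (n, 1, idx)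
      -- second if/elif: compare against the record
      if st.2.1 > sr then
        pvLoopA rest st.1 st.1 st.2.1 st.2.1 st.2.2 st.2.2 [] (idx + 1)
      else if st.2.1 == sr then
        pvLoopA rest st.1 leader st.2.1 sr st.2.2 li
          (ties ++ [(st.1.toString, st.2.1, st.2.2)]) (idx + 1)
      else
        pvLoopA rest st.1 leader st.2.1 sr st.2.2 li ties (idx + 1)

def longest_streak2 (s : String) : List (String × Int × Int) :=
  match s.toList with
  | [] => []                                  -- the `else: return []` branch of `if s != ''`
  | c :: rest => pvLoopA rest c c 1 1 0 0 [] 1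

-- ===== PORT B =====
-- Source B's loop building the runs list: carries (prev, length, start) and the index i
def pvRuns : List Char → Int → Char → Int → Int → List (String × Int × Int)
  | [], _i, prev, len, start => [(prev.toString, len, start)]
  | c :: rest, i, prev, len, start =>
      if c == prev then pvRuns rest (i + 1) prev (len + 1) start
      else (prev.toString, len, start) :: pvRuns rest (i + 1) c 1 i

def longest_streak2_alt (s : String) : List (String × Int × Int) :=
  match s.toList with
  | [] => []
  | c :: rest =>
      let runs := pvRuns rest 1 c 1 0
      -- max(r[1] for r in runs): runs is nonempty; fold from its head
      let best := match runs with
        | [] => 0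
        | r :: rs => rs.foldl (fun m x => max m x.2.1) r.2.1
      runs.filter (fun r => r.2.1 == best)

-- ===== PRECONDITION & SPEC =====
def Spec_longest_streak2 (s : String) (out : List (String × Int × Int)) : Prop := out = longest_streak2_alt s
instance (s : String) (out : List (String × Int × Int)) : Decidable (Spec_longest_streak2 s out) := by unfold Spec_longest_streak2; infer_instance

-- ===== CLAIM (what is proved, stated in full; the proofs are below) =====
def Claim_equal_longest_streak2 : Prop := ∀ (s : String), Dom_longest_streak2 s → Spec_longest_streak2 s (longest_streak2 s)

-- ===== LEMMAS AND PROOFS =====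

-- max run length of a list of runs (0 for [])
def pvListMax (l : List (String × Int × Int)) : Int :=
  l.foldl (fun m r => max m r.2.1) 0

-- the runs of maximal length, in order
def pvMaxFilter (l : List (String × Int × Int)) : List (String × Int × Int) :=
  l.filter (fun r => r.2.1 == pvListMax l)

theorem pvFoldlMax_init_le (l : List (String × Int × Int)) :
    ∀ a : Int, a ≤ l.foldl (fun m r => max m r.2.1) a := by
  induction l with
  | nil => intro a; simp
  | cons x xs ih =>
      intro a
      simp only [List.foldl_cons]
      exact le_trans (le_max_left a x.2.1) (ih _)

theorem pvFoldlMax_mono (l : List (String × Int × Int)) :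
    ∀ a b : Int, a ≤ b →
      l.foldl (fun m r => max m r.2.1) a ≤ l.foldl (fun m r => max m r.2.1) b := by
  induction l with
  | nil => intro a b h; simpa using h
  | cons x xs ih =>
      intro a b h
      simp only [List.foldl_cons]
      exact ih _ _ (max_le_max_right _ h)

theorem pvMem_le_listMax (l : List (String × Int × Int)) :
    ∀ r ∈ l, r.2.1 ≤ pvListMax l := by
  induction l with
  | nil => simp
  | cons x xs ih =>
      intro r hr
      rcases List.mem_cons.mp hr with h | h
      · subst h
        simp only [pvListMax, List.foldl_cons]
        exact le_trans (le_max_right 0 r.2.1) (pvFoldlMax_init_le xs _)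
      · have := ih r h
        simp only [pvListMax, List.foldl_cons] at *
        exact le_trans this (pvFoldlMax_mono xs _ _ (by simp))

theorem pvListMax_append_singleton (h : List (String × Int × Int)) (r : String × Int × Int) :
    pvListMax (h ++ [r]) = max (pvListMax h) r.2.1 := by
  simp [pvListMax, List.foldl_append]

-- pure invariant lemma for A's loop: hist = runs already completed
theorem pvLoopA_eq (rest : List Char) :
    ∀ (cont leader : Char) (sl sr ci li : Int) (ties : List (String × Int × Int))
      (hist : List (String × Int × Int)),
      1 ≤ sl → sl ≤ sr →
      sr = pvListMax (hist ++ [(cont.toString, sl, ci)]) →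
      (leader.toString, sr, li) :: ties
        = (hist ++ [(cont.toString, sl, ci)]).filter (fun r => r.2.1 == sr) →
      pvLoopA rest cont leader sl sr ci li ties (ci + sl)
        = pvMaxFilter (hist ++ pvRuns rest (ci + sl) cont sl ci) := by
  induction rest with
  | nil =>
      intro cont leader sl sr ci li ties hist h1 h2 hmax hfilt
      simp only [pvLoopA, pvRuns, pvMaxFilter]
      rw [← hmax, hfilt]
  | cons n rest ih =>
      intro cont leader sl sr ci li ties hist h1 h2 hmax hfilt
      have hm : sr = max (pvListMax hist) sl := by
        rw [pvListMax_append_singleton] at hmax; simpa using hmax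
      by_cases hc : n == cont
      · -- extend current run
        simp only [pvLoopA, pvRuns, hc, if_pos]
        by_cases hgt : sl + 1 > sr
        · rw [if_pos (by simpa using hgt)]
          have := ih cont cont (sl+1) (sl+1) ci ci [] hist (by omega) le_rfl
            (by rw [pvListMax_append_singleton]; simp; omega)
            (by rw [List.filter_append]
                have hnil : hist.filter (fun r => r.2.1 == (sl+1:Int)) = [] := by
                  rw [List.filter_eq_nil_iff]
                  intro r hr
                  have := pvMem_le_listMax hist r hr
                  simp; omega
                simp [hnil])
          simpa [show ci + sl + 1 = ci + (sl + 1) by ring] using this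
        · rw [if_neg (by simpa using hgt)]
          by_cases heq : sl + 1 = sr
          · rw [if_pos (by simpa using heq)]
            have hfh : (leader.toString, sr, li) :: ties = hist.filter (fun r => r.2.1 == sr) := by
              rw [List.filter_append] at hfilt
              simpa [show ((sl == sr)) = false by simp; omega] using hfilt
            have := ih cont leader (sl+1) sr ci li
              (ties ++ [(cont.toString, sl+1, ci)]) hist (by omega) (by omega)
              (by rw [pvListMax_append_singleton]; simp; omega)
              (by rw [List.filter_append]
                  simp only [List.filter_cons, List.filter_nil]
                  rw [show ((((cont.toString, sl+1, ci) : String × Int × Int).2.1 == sr)) = true by simp; omega]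
                  rw [← hfh]; simp)
            simpa [heq, show ci + sl + 1 = ci + (sl + 1) by ring] using this
          · rw [if_neg (by simpa using heq)]
            have := ih cont leader (sl+1) sr ci li ties hist (by omega) (by omega)
              (by rw [pvListMax_append_singleton]; simp; omega)
              (by rw [List.filter_append] at hfilt ⊢
                  simp only [List.filter_cons, List.filter_nil] at hfilt ⊢
                  rw [show (((sl:Int) == sr)) = false by simp; omega] at hfilt
                  rw [show (((sl+1:Int) == sr)) = false by simp; omega]
                  simpa using hfilt)
            simpa [show ci + sl + 1 = ci + (sl + 1) by ring] using this
      · -- new contender starting at index ci + sl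
        simp only [pvLoopA, pvRuns, hc, Bool.false_eq_true, if_false]
        rw [if_neg (by simp; omega)]
        have hmaxh' : pvListMax (hist ++ [(cont.toString, sl, ci)]) = sr := hmax.symm
        by_cases heq : (1:Int) = sr
        · rw [if_pos (by simpa using heq)]
          have := ih n leader 1 sr (ci + sl) li
            (ties ++ [(n.toString, 1, ci + sl)]) (hist ++ [(cont.toString, sl, ci)])
            le_rfl (by omega)
            (by rw [pvListMax_append_singleton, hmaxh']; simp; omega)
            (by rw [List.filter_append, ← hfilt]
                simp only [List.filter_cons, List.filter_nil]
                rw [show ((((n.toString, (1:Int), ci + sl) : String × Int × Int).2.1 == sr)) = true by simp; omega]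
                simp)
          simpa [List.append_assoc, show ci + sl + 1 = (ci + sl) + 1 by ring] using this
        · rw [if_neg (by simpa using heq)]
          have := ih n leader 1 sr (ci + sl) li ties (hist ++ [(cont.toString, sl, ci)])
            le_rfl (by omega)
            (by rw [pvListMax_append_singleton, hmaxh']; simp; omega)
            (by rw [List.filter_append, ← hfilt]
                simp only [List.filter_cons, List.filter_nil]
                rw [show ((((n.toString, (1:Int), ci + sl) : String × Int × Int).2.1 == sr)) = false by simp; omega]
                simp)
          simpa [List.append_assoc, show ci + sl + 1 = (ci + sl) + 1 by ring] using this

theorem pvRuns_pos (rest : List Char) :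
    ∀ (i : Int) (p : Char) (len start : Int), 1 ≤ len →
      ∀ r ∈ pvRuns rest i p len start, (0:Int) ≤ r.2.1 := by
  induction rest with
  | nil => intro i p len start hlen r hr; simp only [pvRuns, List.mem_singleton] at hr; subst hr; simpa using by omega
  | cons c cs ih =>
      intro i p len start hlen r hr
      simp only [pvRuns] at hr
      split at hr
      · exact ih _ _ _ _ (by omega) r hr
      · rcases List.mem_cons.mp hr with h | h
        · subst h; simpa using by omega
        · exact ih _ _ _ _ (by omega) r h

-- B's head-seeded fold equals pvListMax on a nonempty runs list with nonnegative lengths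
theorem pvBest_eq_listMax (r : String × Int × Int) (rs : List (String × Int × Int))
    (h : (0:Int) ≤ r.2.1) :
    rs.foldl (fun m x => max m x.2.1) r.2.1 = pvListMax (r :: rs) := by
  simp only [pvListMax, List.foldl_cons]
  rw [max_eq_right h]

theorem pvRuns_ne_nil (rest : List Char) :
    ∀ (i : Int) (p : Char) (len start : Int), pvRuns rest i p len start ≠ [] := by
  induction rest with
  | nil => intro i p len start; simp [pvRuns]
  | cons c cs ih =>
      intro i p len start
      simp only [pvRuns]
      split
      · exact ih _ _ _ _
      · simp

theorem pvAlt_eq_maxFilter (c : Char) (rest : List Char) (s : String)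
    (hs : s.toList = c :: rest) :
    longest_streak2_alt s = pvMaxFilter (pvRuns rest 1 c 1 0) := by
  unfold longest_streak2_alt
  rw [hs]
  simp only []
  cases hruns : pvRuns rest 1 c 1 0 with
  | nil => exact absurd hruns (pvRuns_ne_nil rest 1 c 1 0)
  | cons r rs =>
      have hr : (0:Int) ≤ r.2.1 :=
        pvRuns_pos rest 1 c 1 0 le_rfl r (by rw [hruns]; exact List.mem_cons_self)
      simp only [pvMaxFilter]
      rw [pvBest_eq_listMax r rs hr]

-- ===== VERDICT (by name: the statement is the Claim_ definition above) =====
theorem longest_streak2_spec : Claim_equal_longest_streak2 := by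
  intro s _hdom
  unfold Spec_longest_streak2
  unfold longest_streak2
  cases hs : s.toList with
  | nil =>
      unfold longest_streak2_alt
      rw [hs]
  | cons c rest =>
      rw [pvAlt_eq_maxFilter c rest s hs]
      have := pvLoopA_eq rest c c 1 1 0 0 [] []
        le_rfl le_rfl
        (by simp [pvListMax])
        (by simp [List.filter])
      simpa using this
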